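-- pv_equiv track=rewrite | github.com/hyungmogu/algorithm-and-data-structure-exercises | codility_practice/leader/equi_leader_01.py | get_leaders_lhs
-- ===== SOURCE A (Python) =====
-- def get_leaders_lhs(A,N):
--     numbers_frequency = {}
--     leaders_list = [None] * N
--     index = 0
--     leader = None
--
--     # 1. for element, index in A
--     while index < N:
--         # 2. add count to key 'element'
--         number = A[index]
--         n = index + 1
--
--         if number in numbers_frequency:
--             numbers_frequency[number] += 1
--         else:
--             numbers_frequency[number] = 1
--
--         # 3. set leader
--         if leader is None:
--             leader = number
--
--         #   3.1 if current dominator has count more than len(A[:index+1]) // 2, set leader[index] = dominator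
--         if numbers_frequency[leader] > (n // 2):
--             leaders_list[index] = leader
--
--         #   3,2 if A[index] has count more than len(A[:index+1]) // 2, set leader[index] = dominator and set dominator = element
--         if numbers_frequency[number] > (n // 2):
--             leaders_list[index] = number
--             leader = number
--
--         index += 1
--
--     return leaders_list
-- ===== SOURCE B (Python) =====
-- def get_leaders_lhs(A, N):
--     # Boyer-Moore majority voting: a candidate/balance pair plus a running
--     # frequency table used only to verify the candidate at each prefix.
--     result = [None] * N
--     freq = {}
--     cand = 0  # dummy; bal == 0 guarantees it is overwritten before first use
--     bal = 0
--     for i in range(N):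
--         x = A[i]
--         freq[x] = freq.get(x, 0) + 1
--         if bal == 0:
--             cand, bal = x, 1
--         elif x == cand:
--             bal += 1
--         else:
--             bal -= 1
--         if freq[cand] > (i + 1) // 2:
--             result[i] = cand
--     return result
-- ===== Notes on version B (the rewrite author's own statement) =====
-- stated objective: alternative
-- what changed: Replaces A's last-seen-majority leader heuristic (two threshold checks and a tracked 'leader' variable) with incremental Boyer-Moore majority voting (candidate/balance pair) verified against a running frequency table, one check per step.
import Mathlib
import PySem

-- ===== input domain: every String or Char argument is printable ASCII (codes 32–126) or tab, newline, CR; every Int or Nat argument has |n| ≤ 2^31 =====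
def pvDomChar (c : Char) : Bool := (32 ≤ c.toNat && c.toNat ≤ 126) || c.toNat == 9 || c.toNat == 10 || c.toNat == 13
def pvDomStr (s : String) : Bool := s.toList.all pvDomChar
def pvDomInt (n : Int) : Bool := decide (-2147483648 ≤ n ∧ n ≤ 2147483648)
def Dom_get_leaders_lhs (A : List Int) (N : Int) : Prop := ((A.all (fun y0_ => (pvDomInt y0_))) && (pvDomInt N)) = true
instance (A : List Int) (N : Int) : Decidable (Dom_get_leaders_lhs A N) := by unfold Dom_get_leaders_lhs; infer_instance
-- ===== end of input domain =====

-- B replaces A's last-seen-majority 'leader' heuristic with Boyer-Moore voting verified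
-- against the same running frequency table (objective: alternative, same cost).

-- ===== PORT A =====
-- while loop of A: state (index, freq dict, leaders_list, leader); fuel = remaining iterations
def loopA (A : List Int) (N : Int) (fuel : Nat) (index : Int)
    (freq : PySem.Dict Int Int) (leaders : List (Option Int)) (leader : Option Int) :
    List (Option Int) :=
  match fuel with
  | 0 => leaders
  | fuel + 1 =>
    if index < N then
      match PySem.List.pyGet? A index with
      | none => leaders   -- A[index] raises IndexError here; excluded by Pre_
      | some number =>
        let n := index + 1
        let freq := if freq.contains number then freq.insert number (freq.getD number 0 + 1)
                    else freq.insert number 1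
        let l : Int := match leader with | none => number | some l0 => l0  -- 'if leader is None: leader = number'
        let leaders := if freq.getD l 0 > PySem.Int.floordiv n 2 then leaders.set index.toNat (some l) else leaders
        let lead2 : Int := if freq.getD number 0 > PySem.Int.floordiv n 2 then number else l
        let leaders := if freq.getD number 0 > PySem.Int.floordiv n 2 then leaders.set index.toNat (some number) else leaders
        loopA A N fuel (index + 1) freq leaders (some lead2)
    else leaders

def get_leaders_lhs (A : List Int) (N : Int) : List (Option Int) :=
  loopA A N N.toNat 0 PySem.Dict.empty (List.replicate N.toNat none) none

-- ===== PORT B =====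
-- for i in range(N) of Source B: state (i, freq dict, result, cand, bal)
def loopB (A : List Int) (N : Int) (fuel : Nat) (i : Int)
    (freq : PySem.Dict Int Int) (result : List (Option Int)) (cand bal : Int) :
    List (Option Int) :=
  match fuel with
  | 0 => result
  | fuel + 1 =>
    if i < N then
      match PySem.List.pyGet? A i with
      | none => result   -- A[i] raises IndexError here; excluded by Pre_
      | some x =>
        let freq := freq.insert x (freq.getD x 0 + 1)
        let cb : Int × Int := if bal = 0 then (x, 1) else if x = cand then (cand, bal + 1) else (cand, bal - 1)
        let result := if freq.getD cb.1 0 > PySem.Int.floordiv (i + 1) 2 then result.set i.toNat (some cb.1) else result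
        loopB A N fuel (i + 1) freq result cb.1 cb.2
    else result

def get_leaders_lhs_alt (A : List Int) (N : Int) : List (Option Int) :=
  loopB A N N.toNat 0 PySem.Dict.empty (List.replicate N.toNat none) 0 0

-- ===== PRECONDITION & SPEC =====
-- Pre_ excludes exactly the inputs where A raises IndexError (A[index] with N > len(A)).
def Pre_get_leaders_lhs (A : List Int) (N : Int) : Prop := N ≤ (A.length : Int)
instance (A : List Int) (N : Int) : Decidable (Pre_get_leaders_lhs A N) := by
  unfold Pre_get_leaders_lhs; infer_instance

def pvWitness_get_leaders_lhs : List Int × Int := ([1, 2, 1], 3)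

def Spec_get_leaders_lhs (A : List Int) (N : Int) (out : List (Option Int)) : Prop :=
  out = get_leaders_lhs_alt A N
instance (A : List Int) (N : Int) (out : List (Option Int)) : Decidable (Spec_get_leaders_lhs A N out) := by
  unfold Spec_get_leaders_lhs; infer_instance

-- ===== CLAIM (what is proved, stated in full; the proofs are below) =====
def Claim_equal_get_leaders_lhs : Prop := ∀ (A : List Int) (N : Int), Dom_get_leaders_lhs A N → Pre_get_leaders_lhs A N → Spec_get_leaders_lhs A N (get_leaders_lhs A N)

-- ===== LEMMAS AND PROOFS =====

lemma getD_not_contains (d : PySem.Dict Int Int) (k : Int) (h : d.contains k = false) :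
    d.getD k 0 = 0 := by
  have h2 : d.get? k = none := by rw [PySem.Dict.get?_eq_none_iff_contains]; exact h
  simp [PySem.Dict.getD, h2]

lemma count_app_same (P : List Int) (x : Int) : ((P ++ [x]).count x : Int) = (P.count x : Int) + 1 := by
  simp [List.count_append]

lemma count_app_other (P : List Int) (x y : Int) (h : y ≠ x) :
    ((P ++ [x]).count y : Int) = (P.count y : Int) := by
  simp [List.count_append, Ne.symm h]

-- the heart of the argument: given both loops' invariants for the processed prefix P and the
-- next element x, the two updated states coincide and the invariants carry to P ++ [x];
-- the induction hypothesis is taken as an argument so the two `leader` cases can share it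
lemma finish_step (A P : List Int) (N : Int) (fuel : Nat) (index : Int) (x l cand' bal' : Int)
    (freq : PySem.Dict Int Int) (leaders : List (Option Int))
    (hidx : 0 ≤ index)
    (hPlenI : (P.length : Int) = index)
    (htake : A.take (index + 1).toNat = P ++ [x])
    (hfreq' : ∀ y, (freq.insert x (freq.getD x 0 + 1)).getD y 0 = ((P ++ [x]).count y : Int))
    (hcont' : ∀ y, (freq.insert x (freq.getD x 0 + 1)).contains y = false → (P ++ [x]).count y = 0)
    (hIl : ∀ y, 2 * (P.count y : Int) > (P.length : Int) → l = y)
    (hbal' : 0 ≤ bal')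
    (hcand' : 2 * ((P ++ [x]).count cand' : Int) ≤ (index + 1) + bal')
    (hoth' : ∀ y, y ≠ cand' → 2 * ((P ++ [x]).count y : Int) ≤ (index + 1) - bal')
    (ih : ∀ (index : Int) (freq : PySem.Dict Int Int) (leaders : List (Option Int))
      (leader : Option Int) (cand bal : Int), 0 ≤ index →
      (∀ y, freq.getD y 0 = ((A.take index.toNat).count y : Int)) →
      (∀ y, freq.contains y = false → (A.take index.toNat).count y = 0) →
      (∀ y, 2 * ((A.take index.toNat).count y : Int) > ((A.take index.toNat).length : Int) → leader = some y) →
      0 ≤ bal →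
      2 * ((A.take index.toNat).count cand : Int) ≤ ((A.take index.toNat).length : Int) + bal →
      (∀ y, y ≠ cand → 2 * ((A.take index.toNat).count y : Int) ≤ ((A.take index.toNat).length : Int) - bal) →
      loopA A N fuel index freq leaders leader = loopB A N fuel index freq leaders cand bal) :
    (loopA A N fuel (index + 1) (freq.insert x (freq.getD x 0 + 1))
      (if (freq.insert x (freq.getD x 0 + 1)).getD x 0 > PySem.Int.floordiv (index + 1) 2 then
        (if (freq.insert x (freq.getD x 0 + 1)).getD l 0 > PySem.Int.floordiv (index + 1) 2 then
          leaders.set index.toNat (some l) else leaders).set index.toNat (some x)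
       else (if (freq.insert x (freq.getD x 0 + 1)).getD l 0 > PySem.Int.floordiv (index + 1) 2 then
          leaders.set index.toNat (some l) else leaders))
      (some (if (freq.insert x (freq.getD x 0 + 1)).getD x 0 > PySem.Int.floordiv (index + 1) 2 then x else l)))
    = loopB A N fuel (index + 1) (freq.insert x (freq.getD x 0 + 1))
        (if (freq.insert x (freq.getD x 0 + 1)).getD cand' 0 > PySem.Int.floordiv (index + 1) 2 then
          leaders.set index.toNat (some cand') else leaders) cand' bal' := by
  have hlen' : ((A.take (index + 1).toNat).length : Int) = index + 1 := by
    rw [htake]; simp; omega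
  have hl2 : (((P ++ [x]).length : Nat) : Int) = index + 1 := by rw [← htake]; exact hlen'
  have hfd : PySem.Int.floordiv (index + 1) 2 = (index + 1) / 2 :=
    PySem.Int.floordiv_eq_ediv_of_pos (by omega)
  have hJ' : ∀ y, 2 * ((P ++ [x]).count y : Int) > index + 1 → y = cand' := by
    intro y hy
    by_contra hne
    have := hoth' y hne
    omega
  have hCiff : ∀ y, ((freq.insert x (freq.getD x 0 + 1)).getD y 0 > PySem.Int.floordiv (index + 1) 2)
      ↔ 2 * ((P ++ [x]).count y : Int) > index + 1 := by
    intro y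
    rw [hfreq' y, hfd]
    omega
  -- the new-leader invariant, shared by all cases below
  have hIl' : ∀ lead2, (¬ 2 * ((P ++ [x]).count x : Int) > index + 1 → lead2 = l) →
      (2 * ((P ++ [x]).count x : Int) > index + 1 → lead2 = x) →
      ∀ y, 2 * ((A.take (index + 1).toNat).count y : Int) > ((A.take (index + 1).toNat).length : Int) →
      (some lead2 : Option Int) = some y := by
    intro lead2 hno hyes y hy
    rw [htake, hl2] at hy
    by_cases hx : 2 * ((P ++ [x]).count x : Int) > index + 1
    · have h1 := hJ' y hy
      have h2 := hJ' x hx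
      rw [hyes hx, h2, ← h1]
    · have hyx : y ≠ x := by intro h; rw [h] at hy; exact hx hy
      have : 2 * (P.count y : Int) > (P.length : Int) := by
        rw [← count_app_other P x y hyx]; omega
      rw [hno hx, hIl y this]
  -- apply the induction hypothesis once the two lists are shown equal
  have happly : ∀ (L : List (Option Int)) (lead2 : Int),
      (¬ 2 * ((P ++ [x]).count x : Int) > index + 1 → lead2 = l) →
      (2 * ((P ++ [x]).count x : Int) > index + 1 → lead2 = x) →
      loopA A N fuel (index + 1) (freq.insert x (freq.getD x 0 + 1)) L (some lead2)
      = loopB A N fuel (index + 1) (freq.insert x (freq.getD x 0 + 1)) L cand' bal' := by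
    intro L lead2 hno hyes
    apply ih (index + 1) _ L (some lead2) cand' bal' (by omega)
      (by intro y; rw [htake]; exact hfreq' y)
      (by intro y h; rw [htake]; exact hcont' y h)
      (hIl' lead2 hno hyes)
      hbal'
      (by rw [htake, hl2]; exact hcand')
      (by intro y h; rw [htake, hl2]; exact hoth' y h)
  by_cases hp : 2 * ((P ++ [x]).count x : Int) > index + 1
  · -- x is a strict majority of the new prefix; both sides record x
    have hxc : x = cand' := hJ' x hp
    subst hxc
    simp only [if_pos ((hCiff x).mpr hp)]
    by_cases hq : 2 * ((P ++ [x]).count l : Int) > index + 1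
    · simp only [if_pos ((hCiff l).mpr hq), List.set_set]
      exact happly _ _ (fun h => absurd hp h) (fun _ => rfl)
    · simp only [if_neg (fun h => hq ((hCiff l).mp h))]
      exact happly _ _ (fun h => absurd hp h) (fun _ => rfl)
  · by_cases hq : 2 * ((P ++ [x]).count l : Int) > index + 1
    · -- the old leader l is the majority; B's verified candidate is the same value
      have hlc : l = cand' := hJ' l hq
      subst hlc
      simp only [if_neg (fun h => hp ((hCiff x).mp h)), if_pos ((hCiff l).mpr hq)]
      exact happly _ _ (fun _ => rfl) (fun h => absurd h hp)
    · -- no strict majority: neither side writes (B's candidate fails verification)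
      have hrn : ¬ 2 * ((P ++ [x]).count cand' : Int) > index + 1 := by
        intro hr
        by_cases hcx : cand' = x
        · rw [hcx] at hr; exact hp hr
        · have hmaj : 2 * (P.count cand' : Int) > (P.length : Int) := by
            rw [← count_app_other P x cand' hcx]; omega
          have hl := hIl cand' hmaj
          rw [← hl] at hr
          exact hq hr
      simp only [if_neg (fun h => hp ((hCiff x).mp h)), if_neg (fun h => hq ((hCiff l).mp h)),
        if_neg (fun h => hrn ((hCiff cand').mp h))]
      exact happly _ _ (fun _ => rfl) (fun h => absurd h hp)

lemma loop_eq (A : List Int) (N : Int) (fuel : Nat) :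
    ∀ (index : Int) (freq : PySem.Dict Int Int) (leaders : List (Option Int))
      (leader : Option Int) (cand bal : Int),
    0 ≤ index →
    (∀ y, freq.getD y 0 = ((A.take index.toNat).count y : Int)) →
    (∀ y, freq.contains y = false → (A.take index.toNat).count y = 0) →
    (∀ y, 2 * ((A.take index.toNat).count y : Int) > ((A.take index.toNat).length : Int) →
      leader = some y) →
    0 ≤ bal →
    2 * ((A.take index.toNat).count cand : Int) ≤ ((A.take index.toNat).length : Int) + bal →
    (∀ y, y ≠ cand → 2 * ((A.take index.toNat).count y : Int) ≤ ((A.take index.toNat).length : Int) - bal) →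
    loopA A N fuel index freq leaders leader = loopB A N fuel index freq leaders cand bal := by
  induction fuel with
  | zero => intros; rfl
  | succ fuel ih =>
    intro index freq leaders leader cand bal hidx hfreq hcont hI hbal hcand hoth
    rw [loopA, loopB]
    by_cases hiN : index < N
    · rw [if_pos hiN, if_pos hiN]
      rcases hget : PySem.List.pyGet? A index with _ | x
      · rfl
      · rw [PySem.List.pyGet?_of_nonneg A hidx] at hget
        obtain ⟨hlt, hxval⟩ := List.getElem?_eq_some_iff.mp hget
        have hPlenI : ((A.take index.toNat).length : Int) = index := by
          simp [List.length_take]; omega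
        have htake : A.take (index + 1).toNat = A.take index.toNat ++ [x] := by
          have h1 : (index + 1).toNat = index.toNat + 1 := by omega
          rw [h1, List.take_add_one, hget]
          rfl
        dsimp only
        have hfA : (if freq.contains x then freq.insert x (freq.getD x 0 + 1) else freq.insert x 1)
            = freq.insert x (freq.getD x 0 + 1) := by
          by_cases hc : freq.contains x
          · rw [if_pos hc]
          · have hc' : freq.contains x = false := by simpa using hc
            have h0 : freq.getD x 0 = 0 := getD_not_contains freq x hc'
            rw [if_neg hc, h0]
            norm_num
        rw [hfA]
        have hfreq' : ∀ y, (freq.insert x (freq.getD x 0 + 1)).getD y 0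
            = ((A.take index.toNat ++ [x]).count y : Int) := by
          intro y
          by_cases hxy : y = x
          · subst hxy
            rw [PySem.Dict.getD_insert_self, hfreq y, count_app_same]
          · rw [PySem.Dict.getD_insert_of_ne freq _ _ hxy, hfreq y, count_app_other _ _ _ hxy]
        have hcont' : ∀ y, (freq.insert x (freq.getD x 0 + 1)).contains y = false →
            (A.take index.toNat ++ [x]).count y = 0 := by
          intro y hy
          rw [PySem.Dict.contains_insert] at hy
          have hyx : y ≠ x := by
            intro h; subst h; simp at hy
          have hc : freq.contains y = false := by
            rcases Bool.or_eq_false_iff.mp hy with ⟨_, h2⟩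
            exact h2
          have h1 := hcont y hc
          have h2 := count_app_other (A.take index.toNat) x y hyx
          omega
        have hx1 := count_app_same (A.take index.toNat) x
        -- the invariant 'any strict majority of the processed prefix is l' for the matched leader value
        rcases leader with _ | l0
        · -- leader is None: the prefix has no strict majority, the invariant is vacuous
          have hIl : ∀ y, 2 * (((A.take index.toNat).count y : Nat) : Int) > (((A.take index.toNat).length : Nat) : Int) → x = y := by
            intro y hy
            exact absurd (hI y hy) (by simp)
          by_cases hb0 : bal = 0
          · simp only [if_pos hb0]
            have hcx : 2 * (((A.take index.toNat).count x : Nat) : Int) ≤ (((A.take index.toNat).length : Nat) : Int) := by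
              by_cases hxc : x = cand
              · rw [hxc]; have := hcand; omega
              · have := hoth x hxc; omega
            refine finish_step A (A.take index.toNat) N fuel index x x x 1 freq leaders hidx hPlenI htake hfreq' hcont' hIl (by omega) (by omega) ?_ ih
            intro y hy
            have h2 := count_app_other (A.take index.toNat) x y hy
            have : 2 * (((A.take index.toNat).count y : Nat) : Int) ≤ (((A.take index.toNat).length : Nat) : Int) := by
              by_cases hyc : y = cand
              · rw [hyc]; have := hcand; omega
              · have := hoth y hyc; omega
            omega
          · by_cases hxc : x = cand
            · simp only [if_neg hb0, if_pos hxc]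
              have e1 : (((A.take index.toNat ++ [x]).count cand : Nat) : Int)
                  = (((A.take index.toNat).count x : Nat) : Int) + 1 := by rw [← hxc]; exact hx1
              have e2 : 2 * (((A.take index.toNat).count x : Nat) : Int)
                  ≤ (((A.take index.toNat).length : Nat) : Int) + bal := by rw [hxc]; exact hcand
              refine finish_step A (A.take index.toNat) N fuel index x x cand (bal + 1) freq leaders hidx hPlenI htake hfreq' hcont' hIl (by omega) (by omega) ?_ ih
              intro y hy
              have hyx : y ≠ x := by rw [hxc]; exact hy
              have h2 := count_app_other (A.take index.toNat) x y hyx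
              have := hoth y hy
              omega
            · simp only [if_neg hb0, if_neg hxc]
              have hcx : cand ≠ x := fun h => hxc h.symm
              have e1 := count_app_other (A.take index.toNat) x cand hcx
              refine finish_step A (A.take index.toNat) N fuel index x x cand (bal - 1) freq leaders hidx hPlenI htake hfreq' hcont' hIl (by omega) (by have := hcand; omega) ?_ ih
              intro y hy
              have := hoth y hy
              by_cases hyx : y = x
              · subst hyx; omega
              · have h2 := count_app_other (A.take index.toNat) x y hyx
                omega
        · -- leader is some l0
          have hIl : ∀ y, 2 * (((A.take index.toNat).count y : Nat) : Int) > (((A.take index.toNat).length : Nat) : Int) → l0 = y := by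
            intro y hy
            exact Option.some.inj (hI y hy)
          by_cases hb0 : bal = 0
          · simp only [if_pos hb0]
            have hcx : 2 * (((A.take index.toNat).count x : Nat) : Int) ≤ (((A.take index.toNat).length : Nat) : Int) := by
              by_cases hxc : x = cand
              · rw [hxc]; have := hcand; omega
              · have := hoth x hxc; omega
            refine finish_step A (A.take index.toNat) N fuel index x l0 x 1 freq leaders hidx hPlenI htake hfreq' hcont' hIl (by omega) (by omega) ?_ ih
            intro y hy
            have h2 := count_app_other (A.take index.toNat) x y hy
            have : 2 * (((A.take index.toNat).count y : Nat) : Int) ≤ (((A.take index.toNat).length : Nat) : Int) := by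
              by_cases hyc : y = cand
              · rw [hyc]; have := hcand; omega
              · have := hoth y hyc; omega
            omega
          · by_cases hxc : x = cand
            · simp only [if_neg hb0, if_pos hxc]
              have e1 : (((A.take index.toNat ++ [x]).count cand : Nat) : Int)
                  = (((A.take index.toNat).count x : Nat) : Int) + 1 := by rw [← hxc]; exact hx1
              have e2 : 2 * (((A.take index.toNat).count x : Nat) : Int)
                  ≤ (((A.take index.toNat).length : Nat) : Int) + bal := by rw [hxc]; exact hcand
              refine finish_step A (A.take index.toNat) N fuel index x l0 cand (bal + 1) freq leaders hidx hPlenI htake hfreq' hcont' hIl (by omega) (by omega) ?_ ih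
              intro y hy
              have hyx : y ≠ x := by rw [hxc]; exact hy
              have h2 := count_app_other (A.take index.toNat) x y hyx
              have := hoth y hy
              omega
            · simp only [if_neg hb0, if_neg hxc]
              have hcx : cand ≠ x := fun h => hxc h.symm
              have e1 := count_app_other (A.take index.toNat) x cand hcx
              refine finish_step A (A.take index.toNat) N fuel index x l0 cand (bal - 1) freq leaders hidx hPlenI htake hfreq' hcont' hIl (by omega) (by have := hcand; omega) ?_ ih
              intro y hy
              have := hoth y hy
              by_cases hyx : y = x
              · subst hyx; omega
              · have h2 := count_app_other (A.take index.toNat) x y hyx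
                omega
    · rw [if_neg hiN, if_neg hiN]

-- ===== VERDICT (by name: the statement is the Claim_ definition above) =====
theorem get_leaders_lhs_spec : Claim_equal_get_leaders_lhs := by
  intro A N _ _
  unfold Spec_get_leaders_lhs get_leaders_lhs get_leaders_lhs_alt
  exact loop_eq A N N.toNat 0 PySem.Dict.empty (List.replicate N.toNat none) none 0 0
    le_rfl (by simp) (by simp) (by simp) le_rfl (by simp) (by simp)
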